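-- pv_equiv track=rewrite | github.com/eth-easl/Scratchpad | scratchpad/config/utils.py | is_multimodal_model
-- ===== SOURCE A (Python) =====
-- from typing import Union, Optional, List, Any
--
-- multimodal_model_archs = [
--     "DeepseekVL2ForCausalLM",
--     "Gemma3ForConditionalGeneration",
--     "Grok1VForCausalLM",
--     "Grok1AForCausalLM",
--     "LlavaLlamaForCausalLM",
--     "LlavaMistralForCausalLM",
--     "LlavaQwenForCausalLM",
--     "LlavaVidForCausalLM",
--     "MiniCPMO",
--     "MiniCPMV",
--     "MultiModalityCausalLM",
--     "MllamaForConditionalGeneration",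
--     "Qwen2VLForConditionalGeneration",
--     "Qwen2_5_VLForConditionalGeneration",
--     "CLIPModel",
-- ]
--
-- def is_multimodal_model(model_architectures: List[str]):
--     if any(
--         multi_model_arch in model_architectures
--         for multi_model_arch in multimodal_model_archs
--     ):
--         return True
--     else:
--         return False
-- ===== SOURCE B (Python) =====
-- multimodal_model_archs = [
--     "DeepseekVL2ForCausalLM",
--     "Gemma3ForConditionalGeneration",
--     "Grok1VForCausalLM",
--     "Grok1AForCausalLM",
--     "LlavaLlamaForCausalLM",
--     "LlavaMistralForCausalLM",
--     "LlavaQwenForCausalLM",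
--     "LlavaVidForCausalLM",
--     "MiniCPMO",
--     "MiniCPMV",
--     "MultiModalityCausalLM",
--     "MllamaForConditionalGeneration",
--     "Qwen2VLForConditionalGeneration",
--     "Qwen2_5_VLForConditionalGeneration",
--     "CLIPModel",
-- ]
--
-- _known_archs = set(multimodal_model_archs)
--
-- def is_multimodal_model(model_architectures):
--     # one pass over the INPUT, membership in a precomputed set of known archs
--     return any(arch in _known_archs for arch in model_architectures)
-- ===== Notes on version B (the rewrite author's own statement) =====
-- stated objective: faster
-- what changed: A loops over the 15 known arch names testing each for membership in the input list; B iterates the input list once, testing each element against a precomputed set of known archs, returning any() directly instead of an if/else over the any().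
import Mathlib
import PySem

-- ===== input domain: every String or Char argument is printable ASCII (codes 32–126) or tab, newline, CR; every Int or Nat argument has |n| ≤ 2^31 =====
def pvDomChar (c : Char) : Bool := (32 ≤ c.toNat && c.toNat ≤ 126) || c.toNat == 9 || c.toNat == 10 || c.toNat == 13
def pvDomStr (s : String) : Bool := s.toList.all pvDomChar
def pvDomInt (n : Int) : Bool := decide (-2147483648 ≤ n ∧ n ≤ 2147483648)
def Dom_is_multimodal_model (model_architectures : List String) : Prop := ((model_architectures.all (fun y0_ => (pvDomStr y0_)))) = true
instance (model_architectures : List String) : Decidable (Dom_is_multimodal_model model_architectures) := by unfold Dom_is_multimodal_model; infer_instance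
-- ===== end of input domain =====

-- B iterates the input once against a precomputed set of known archs instead of looping over the known names scanning the input list; idiomatic, same result.
-- ===== PORT A =====
def multimodal_model_archs : List String := ["DeepseekVL2ForCausalLM", "Gemma3ForConditionalGeneration", "Grok1VForCausalLM", "Grok1AForCausalLM", "LlavaLlamaForCausalLM", "LlavaMistralForCausalLM", "LlavaQwenForCausalLM", "LlavaVidForCausalLM", "MiniCPMO", "MiniCPMV", "MultiModalityCausalLM", "MllamaForConditionalGeneration", "Qwen2VLForConditionalGeneration", "Qwen2_5_VLForConditionalGeneration", "CLIPModel"]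

def is_multimodal_model (model_architectures : List String) : Bool :=
  if multimodal_model_archs.any (fun multi_model_arch => model_architectures.contains multi_model_arch) then
    true
  else
    false

-- ===== PORT B =====
def known_archs : PySem.Set String := PySem.Set.ofList multimodal_model_archs

def is_multimodal_model_alt (model_architectures : List String) : Bool :=
  model_architectures.any (fun arch => PySem.Set.contains known_archs arch)

-- ===== PRECONDITION & SPEC =====
def Spec_is_multimodal_model (model_architectures : List String) (out : Bool) : Prop := out = is_multimodal_model_alt model_architectures
instance (model_architectures : List String) (out : Bool) : Decidable (Spec_is_multimodal_model model_architectures out) := by unfold Spec_is_multimodal_model; infer_instance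

-- ===== CLAIM (what is proved, stated in full; the proofs are below) =====
def Claim_equal_is_multimodal_model : Prop := ∀ (model_architectures : List String), Dom_is_multimodal_model model_architectures → Spec_is_multimodal_model model_architectures (is_multimodal_model model_architectures)

-- ===== LEMMAS AND PROOFS =====

-- ===== VERDICT (by name: the statement is the Claim_ definition above) =====
theorem is_multimodal_model_spec : Claim_equal_is_multimodal_model := by
  intro model_architectures _
  unfold Spec_is_multimodal_model is_multimodal_model is_multimodal_model_alt known_archs
  have h : (model_architectures.any fun arch =>
      PySem.Set.contains (PySem.Set.ofList multimodal_model_archs) arch) =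
      (multimodal_model_archs.any fun a => model_architectures.contains a) := by
    simp only [PySem.Set.contains, List.contains_eq_mem, PySem.Set.mem_ofList]
    rw [Bool.eq_iff_iff]
    simp only [List.any_eq_true, decide_eq_true_eq]
    constructor
    · rintro ⟨a, ha, hb⟩; exact ⟨a, hb, ha⟩
    · rintro ⟨a, ha, hb⟩; exact ⟨a, hb, ha⟩
  rw [h]
  split_ifs with hc <;> simp_all
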